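-- pv_equiv track=rewrite | github.com/Erhan1706/thedevhunt | api/scrapers/scraper_factory.py | is_tech_role
-- ===== SOURCE A (Python) =====
-- def is_tech_role(job):
--   # Need to be lowercase for case-insensitive search
--   tech_keywords = ['developer', 'programmer', 'software', 'it', 'technical', 'data', 'devops', 'ai',
--                     'machine learning', 'ml', 'cloud', 'database', 'network', 'security', 'embedded',
--                     'systems', 'web', 'mobile', 'frontend', 'backend', 'fullstack', "qa"]
--
--   for role in job['role']:
--       if any(keyword in role.lower() for keyword in tech_keywords):
--           return True
--   return False
-- ===== SOURCE B (Python) =====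
-- def is_tech_role(job):
--     keywords = ("developer,programmer,software,it,technical,data,devops,ai,"
--                 "machine learning,ml,cloud,database,network,security,embedded,"
--                 "systems,web,mobile,frontend,backend,fullstack,qa").split(',')
--     # One haystack, lowercased once; '\n' appears in no keyword, so no
--     # match can span a role boundary.
--     haystack = "\n".join(job['role']).lower()
--     for kw in keywords:
--         if kw in haystack:
--             return True
--     return False
-- ===== Notes on version B (the rewrite author's own statement) =====
-- stated objective: alternative
-- what changed: B stores the keywords as one comma-separated string split at runtime, joins all roles into a single newline-separated haystack lowercased once, and scans it with an explicit early-return keyword loop, instead of A's per-role loop that lowercases each role and runs any() over a keyword list literal.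
import Mathlib
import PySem

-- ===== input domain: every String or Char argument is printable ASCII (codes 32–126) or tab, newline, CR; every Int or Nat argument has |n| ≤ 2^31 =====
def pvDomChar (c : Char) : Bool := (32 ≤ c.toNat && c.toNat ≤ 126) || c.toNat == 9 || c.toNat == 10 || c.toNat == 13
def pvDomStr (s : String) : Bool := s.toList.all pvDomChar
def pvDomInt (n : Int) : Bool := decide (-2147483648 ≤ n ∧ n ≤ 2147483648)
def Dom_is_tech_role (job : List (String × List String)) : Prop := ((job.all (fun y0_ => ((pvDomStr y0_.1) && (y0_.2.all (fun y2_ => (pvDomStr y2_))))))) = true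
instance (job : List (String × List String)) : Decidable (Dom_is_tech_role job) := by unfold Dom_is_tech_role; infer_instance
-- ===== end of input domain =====

-- B keeps the keywords in one comma-separated string split at runtime, joins all roles into a
-- single newline-separated haystack lowercased once, and scans it with an early-return keyword
-- loop (alternative decomposition; return value only, neither version mutates).

-- ===== PORT A =====
-- A's keyword list literal
def techKeywords : List String :=
  ["developer", "programmer", "software", "it", "technical", "data", "devops", "ai",
   "machine learning", "ml", "cloud", "database", "network", "security", "embedded",
   "systems", "web", "mobile", "frontend", "backend", "fullstack", "qa"]

-- for role in job['role']: if any(kw in role.lower() for kw in tech_keywords): return True; return False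
def is_tech_role (job : List (String × List String)) : Bool :=
  match (PySem.Dict.mk job).get? "role" with
  | none => false   -- Python raises KeyError here; excluded by Pre_
  | some roles =>
      roles.any (fun role => techKeywords.any (fun kw => PySem.Str.isIn kw (PySem.Str.lower role)))

-- ===== PORT B =====
-- B's keyword store: one comma-separated string, split at runtime ("...".split(','))
def kwString : String :=
  "developer,programmer,software,it,technical,data,devops,ai,machine learning,ml,cloud,database,network,security,embedded,systems,web,mobile,frontend,backend,fullstack,qa"

-- the explicit for-loop with early return: first keyword found in the haystack wins
def findKw : List String → String → Bool
  | [], _ => false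
  | kw :: rest, hay => if PySem.Str.isIn kw hay then true else findKw rest hay

-- haystack = "\n".join(job['role']).lower(); for kw in keywords: if kw in haystack: return True; return False
def is_tech_role_alt (job : List (String × List String)) : Bool :=
  match (PySem.Dict.mk job).get? "role" with
  | none => false   -- Python raises KeyError here; excluded by Pre_
  | some roles =>
      findKw ((PySem.Str.split? kwString ",").getD []) (PySem.Str.lower (PySem.Str.join "\n" roles))

-- ===== PRECONDITION & SPEC =====
-- Pre_ excludes exactly the dicts without a 'role' key, on which Python A raises KeyError.
def Pre_is_tech_role (job : List (String × List String)) : Prop :=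
  (PySem.Dict.mk job).contains "role" = true
instance (job : List (String × List String)) : Decidable (Pre_is_tech_role job) := by
  unfold Pre_is_tech_role; infer_instance

def pvWitness_is_tech_role : (List (String × List String)) := [("role", ["Chef", "IT admin"])]

def Spec_is_tech_role (job : List (String × List String)) (out : Bool) : Prop := out = is_tech_role_alt job
instance (job : List (String × List String)) (out : Bool) : Decidable (Spec_is_tech_role job out) := by unfold Spec_is_tech_role; infer_instance

-- ===== CLAIM (what is proved, stated in full; the proofs are below) =====
def Claim_equal_is_tech_role : Prop := ∀ (job : List (String × List String)), Dom_is_tech_role job → Pre_is_tech_role job → Spec_is_tech_role job (is_tech_role job)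

-- ===== LEMMAS AND PROOFS =====

-- splitting B's comma string recovers A's keyword list
set_option maxRecDepth 20000 in
theorem split_kwString : (PySem.Str.split? kwString ",").getD [] = techKeywords := by decide

-- the early-return loop is the existential scan
theorem findKw_eq_any (l : List String) (hay : String) :
    findKw l hay = l.any (fun kw => PySem.Str.isIn kw hay) := by
  induction l with
  | nil => rfl
  | cons kw rest ih =>
      simp only [findKw, List.any_cons, ih]
      by_cases h : PySem.Str.isIn kw hay = true <;> simp

-- lowercasing after joining with '\n' = joining the lowercased parts ('\n' is its own lowercase)
theorem chars_lower_join : ∀ (ps : List (List Char)),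
    PySem.Chars.lower (PySem.Chars.join ['\n'] ps)
      = PySem.Chars.join ['\n'] (ps.map PySem.Chars.lower)
  | [] => rfl
  | [p] => by simp [PySem.Chars.join_singleton]
  | p :: q :: rest => by
      rw [PySem.Chars.join_cons_cons, List.map_cons, List.map_cons,
          PySem.Chars.join_cons_cons (rest := rest.map PySem.Chars.lower),
          ← List.map_cons, ← chars_lower_join (q :: rest)]
      simp only [PySem.Chars.lower, List.map_append, List.map_cons, List.map_nil,
        show PySem.Chars.lowerChar '\n' = '\n' from rfl]

-- An occurrence of sub in a ++ c :: b cannot cross the separator c when c ∉ sub.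
theorem infix_append_cons_iff {α : Type} (sub a b : List α) (c : α) (hc : c ∉ sub) :
    sub <:+: a ++ c :: b ↔ sub <:+: a ∨ sub <:+: b := by
  constructor
  · rintro ⟨s, t, h⟩
    by_cases h1 : s.length + sub.length ≤ a.length
    · left
      have hsa : s.length ≤ a.length := by omega
      have hsub : sub.length ≤ a.length - s.length := by omega
      have hth := congrArg (List.take a.length) h
      rw [show a ++ c :: b = a ++ (c :: b) from rfl, List.take_append_of_le_length (le_refl a.length),
          List.take_of_length_le (le_refl a.length)] at hth
      rw [List.take_append, List.take_append, List.take_of_length_le hsa,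
          List.take_of_length_le hsub] at hth
      exact ⟨s, _, by simpa [List.append_assoc] using hth⟩
    · by_cases h2 : a.length + 1 ≤ s.length
      · right
        have hth := congrArg (List.drop (a.length + 1)) h
        have hb : (a ++ c :: b).drop (a.length + 1) = b := by
          rw [show a ++ c :: b = (a ++ [c]) ++ b by simp,
              show a.length + 1 = (a ++ [c]).length by simp]
          exact List.drop_left
        rw [hb, List.append_assoc, List.drop_append_of_le_length h2] at hth
        exact ⟨s.drop (a.length + 1), t, by simpa [List.append_assoc] using hth⟩
      · exfalso
        have hs : s.length ≤ a.length := by omega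
        have hi : a.length - s.length < sub.length := by omega
        have heq : (s ++ sub ++ t)[a.length]? = (a ++ c :: b)[a.length]? := by rw [h]
        have hrhs : (a ++ c :: b)[a.length]? = some c := by
          rw [List.getElem?_append_right (le_refl a.length)]
          simp
        have hlhs : (s ++ sub ++ t)[a.length]? = some (sub[a.length - s.length]'hi) := by
          rw [List.append_assoc,
              List.getElem?_append_right hs,
              List.getElem?_append_left hi]
          simp
        rw [hrhs, hlhs] at heq
        rw [Option.some_inj] at heq
        exact hc (heq ▸ List.getElem_mem hi)
  · rintro (h | h)
    · exact h.trans ⟨[], c :: b, by simp⟩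
    · exact h.trans ⟨a ++ [c], [], by simp⟩

-- Scanning the c-joined concatenation finds sub exactly when some part contains it.
theorem infix_join_iff (sub : List Char) (c : Char) (hsub : sub ≠ []) (hc : c ∉ sub) :
    ∀ (parts : List (List Char)),
      (sub <:+: PySem.Chars.join [c] parts ↔ ∃ p ∈ parts, sub <:+: p)
  | [] => by
      simp [PySem.Chars.join_nil, List.infix_nil, hsub]
  | [p] => by
      simp [PySem.Chars.join_singleton]
  | p :: q :: rest => by
      rw [PySem.Chars.join_cons_cons,
          show p ++ [c] ++ PySem.Chars.join [c] (q :: rest)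
             = p ++ c :: PySem.Chars.join [c] (q :: rest) by simp,
          infix_append_cons_iff sub p _ c hc,
          infix_join_iff sub c hsub hc (q :: rest)]
      simp only [List.mem_cons]
      constructor
      · rintro (h | ⟨x, hx, h⟩)
        · exact ⟨p, Or.inl rfl, h⟩
        · exact ⟨x, Or.inr hx, h⟩
      · rintro ⟨x, (rfl | hx), h⟩
        · exact Or.inl h
        · exact Or.inr ⟨x, hx, h⟩

theorem kw_facts : ∀ kw ∈ techKeywords, kw.toList ≠ [] ∧ ('\n' : Char) ∉ kw.toList := by
  decide

-- the core equality between B's single-haystack scan and A's per-role scan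
theorem scan_eq (roles : List String) :
    techKeywords.any (fun kw => PySem.Str.isIn kw (PySem.Str.lower (PySem.Str.join "\n" roles)))
    = roles.any (fun role => techKeywords.any (fun kw => PySem.Str.isIn kw (PySem.Str.lower role))) := by
  rw [Bool.eq_iff_iff]
  simp only [List.any_eq_true]
  constructor
  · rintro ⟨kw, hkw, h⟩
    obtain ⟨hne, hnl⟩ := kw_facts kw hkw
    rw [PySem.Str.isIn_iff_infix, PySem.Str.toList_lower, PySem.Str.toList_join,
        show ("\n" : String).toList = ['\n'] by decide, chars_lower_join,
        infix_join_iff kw.toList '\n' hne hnl] at h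
    obtain ⟨p, hp, hinf⟩ := h
    simp only [List.map_map, List.mem_map] at hp
    obtain ⟨role, hrole, rfl⟩ := hp
    refine ⟨role, hrole, kw, hkw, ?_⟩
    rw [PySem.Str.isIn_iff_infix, PySem.Str.toList_lower]
    exact hinf
  · rintro ⟨role, hrole, kw, hkw, h⟩
    obtain ⟨hne, hnl⟩ := kw_facts kw hkw
    refine ⟨kw, hkw, ?_⟩
    rw [PySem.Str.isIn_iff_infix] at h ⊢
    rw [PySem.Str.toList_lower, PySem.Str.toList_join,
        show ("\n" : String).toList = ['\n'] by decide, chars_lower_join,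
        infix_join_iff kw.toList '\n' hne hnl]
    rw [PySem.Str.toList_lower] at h
    exact ⟨PySem.Chars.lower role.toList, by
      simp only [List.map_map, List.mem_map]; exact ⟨role, hrole, rfl⟩, h⟩

-- ===== VERDICT (by name: the statement is the Claim_ definition above) =====
theorem is_tech_role_spec : Claim_equal_is_tech_role := by
  intro job _ hpre
  unfold Spec_is_tech_role is_tech_role is_tech_role_alt
  rw [Pre_is_tech_role, PySem.Dict.contains_eq_isSome_get?] at hpre
  cases hget : (PySem.Dict.mk job).get? "role" with
  | none => rw [hget] at hpre
  | some roles =>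
      simp only [split_kwString, findKw_eq_any, scan_eq]
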